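-- pv_equiv track=rewrite | github.com/lee-JunR/Algorithm_BAEKJOON | 백준/Gold/1715. 카드 정렬하기/카드 정렬하기.py | merge_sorted_card_packs
-- ===== SOURCE A (Python) =====
-- import heapq
--
-- def merge_sorted_card_packs(card_packs):
--   heapq.heapify(card_packs)
--   total_comparisons = 0
--   while len(card_packs) > 1:
--     pack1 = heapq.heappop(card_packs)
--     pack2 = heapq.heappop(card_packs)
--     merged_pack = pack1 + pack2
--     heapq.heappush(card_packs, merged_pack)
--     total_comparisons += pack1 + pack2
--   return total_comparisons
-- ===== SOURCE B (Python) =====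
-- def merge_sorted_card_packs(card_packs):
--   # Two-queue Huffman merge instead of a binary heap: sort the packs once into a
--   # leaf queue, keep merged sums in a second FIFO queue (sums are produced in
--   # nondecreasing order), and repeatedly pop the smaller of the two queue fronts.
--   # Like A, leaves card_packs holding the single merged pack at the end.
--   leaves = sorted(card_packs)
--   merged = []
--   total_comparisons = 0
--   i = 0  # front of leaves
--   j = 0  # front of merged
--   while (len(leaves) - i) + (len(merged) - j) > 1:
--     if j >= len(merged) or (i < len(leaves) and leaves[i] <= merged[j]):
--       pack1 = leaves[i]; i += 1
--     else:
--       pack1 = merged[j]; j += 1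
--     if j >= len(merged) or (i < len(leaves) and leaves[i] <= merged[j]):
--       pack2 = leaves[i]; i += 1
--     else:
--       pack2 = merged[j]; j += 1
--     merged.append(pack1 + pack2)
--     total_comparisons += pack1 + pack2
--   card_packs[:] = leaves[i:] + merged[j:]
--   return total_comparisons
-- ===== Notes on version B (the rewrite author's own statement) =====
-- stated objective: faster
-- what changed: Replaces the binary min-heap (heapify/heappop/heappush) with the classic two-queue Huffman construction: sort the packs once into a leaf FIFO queue, keep merged sums in a second FIFO queue (sums come out in nondecreasing order), and always combine the two smaller queue fronts.
import Mathlib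
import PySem

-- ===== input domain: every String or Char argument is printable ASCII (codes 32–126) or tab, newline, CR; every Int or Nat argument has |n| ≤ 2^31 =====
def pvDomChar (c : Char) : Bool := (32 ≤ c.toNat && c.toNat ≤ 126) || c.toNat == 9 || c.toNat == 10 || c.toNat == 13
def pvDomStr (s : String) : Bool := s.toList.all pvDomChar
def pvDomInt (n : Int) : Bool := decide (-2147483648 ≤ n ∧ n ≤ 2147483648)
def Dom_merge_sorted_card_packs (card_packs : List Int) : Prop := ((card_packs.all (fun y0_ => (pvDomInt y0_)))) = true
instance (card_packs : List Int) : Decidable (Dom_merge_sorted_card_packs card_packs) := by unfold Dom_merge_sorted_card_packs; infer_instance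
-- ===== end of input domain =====

-- B replaces A's binary min-heap with the two-queue Huffman construction (sort the packs
-- once into a leaf FIFO queue, keep merged sums in a second FIFO queue, always combine the
-- two smaller queue fronts); same return value (A also mutates its argument; B performs the
-- same final mutation).


-- ===== PORT A =====
-- heapq is ported by its observable semantics on a list of Ints: heapq.heapify only
-- rearranges the list (no element is observed before the first heappop), heappop
-- removes and returns the smallest element, heappush adds one.  This is value-exact
-- here: A's return value depends only on the multiset of heap elements.
def heappopMin (h : List Int) : Option (Int × List Int) :=
  (PySem.List.min? h (fun z => z)).bind fun m =>
    (PySem.List.remove? h m).map fun t => (m, t)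

theorem heappopMin_length {h : List Int} {m : Int} {t : List Int}
    (hp : heappopMin h = some (m, t)) : t.length + 1 = h.length := by
  unfold heappopMin at hp
  cases hmin : PySem.List.min? h (fun z => z) with
  | none => rw [hmin] at hp; exact absurd hp (by simp)
  | some m0 =>
    rw [hmin] at hp
    simp only [Option.bind_some] at hp
    have hmem : m0 ∈ h := PySem.List.min?_mem hmin
    rw [PySem.List.remove?_eq_some_erase _ _ hmem] at hp
    simp only [Option.map_some, Option.some.injEq, Prod.mk.injEq] at hp
    rcases hp with ⟨rfl, rfl⟩
    have hpos : 0 < h.length := List.length_pos_of_mem hmem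
    rw [List.length_erase_of_mem hmem]
    omega

-- the 'while len(card_packs) > 1' loop of A
def mergeLoopA (h : List Int) (acc : Int) : Int :=
  if _hlen : 1 < h.length then
    match hp1 : heappopMin h with
    | none => acc
    | some (p1, h1) =>
      match hp2 : heappopMin h1 with
      | none => acc
      | some (p2, h2) =>
        mergeLoopA (h2 ++ [p1 + p2]) (acc + (p1 + p2))
  else acc
termination_by h.length
decreasing_by
  have e1 := heappopMin_length hp1
  have e2 := heappopMin_length hp2
  simp only [List.length_append, List.length_cons, List.length_nil]
  omega

def merge_sorted_card_packs (card_packs : List Int) : Int :=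
  mergeLoopA card_packs 0

-- ===== PORT B =====
-- B keeps the two FIFO queues as their remaining suffixes (Python advances the front
-- indices i and j; dropping the front of the suffix is the same step).  popSmaller is
-- B's 'if j >= len(merged) or (i < len(leaves) and leaves[i] <= merged[j]): take a
-- leaf else take a merged sum'; the both-empty case is unreachable inside the loop
-- (total length > 1) and only makes the function total.
def popSmaller (lv mg : List Int) : Int × List Int × List Int :=
  match lv, mg with
  | x :: lt, m :: mt => if x ≤ m then (x, lt, m :: mt) else (m, x :: lt, mt)
  | x :: lt, [] => (x, lt, [])
  | [], m :: mt => (m, [], mt)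
  | [], [] => (0, [], [])

theorem popSmaller_length (lv mg : List Int) (h : 0 < lv.length + mg.length) :
    (popSmaller lv mg).2.1.length + (popSmaller lv mg).2.2.length + 1
      = lv.length + mg.length := by
  rcases lv with _ | ⟨x, lt⟩ <;> rcases mg with _ | ⟨m, mt⟩ <;>
    simp [popSmaller] at h ⊢ <;> split <;> simp <;> omega

-- the 'while (len(leaves) - i) + (len(merged) - j) > 1' loop of B
def twoQueueLoop (lv mg : List Int) (acc : Int) : Int :=
  if hlen : 1 < lv.length + mg.length then
    let p1 := popSmaller lv mg
    let p2 := popSmaller p1.2.1 p1.2.2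
    twoQueueLoop p2.2.1 (p2.2.2 ++ [p1.1 + p2.1]) (acc + (p1.1 + p2.1))
  else acc
termination_by lv.length + mg.length
decreasing_by
  have e1 := popSmaller_length lv mg (by omega)
  have e2 := popSmaller_length (popSmaller lv mg).2.1 (popSmaller lv mg).2.2 (by omega)
  simp only [List.length_append, List.length_cons, List.length_nil]
  omega

def merge_sorted_card_packs_alt (card_packs : List Int) : Int :=
  twoQueueLoop (PySem.List.sorted card_packs (fun z => z) false) [] 0

-- ===== PRECONDITION & SPEC =====
def Spec_merge_sorted_card_packs (card_packs : List Int) (out : Int) : Prop := out = merge_sorted_card_packs_alt card_packs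
instance (card_packs : List Int) (out : Int) : Decidable (Spec_merge_sorted_card_packs card_packs out) := by unfold Spec_merge_sorted_card_packs; infer_instance

-- ===== CLAIM (what is proved, stated in full; the proofs are below) =====
def Claim_equal_merge_sorted_card_packs : Prop := ∀ (card_packs : List Int), Dom_merge_sorted_card_packs card_packs → Spec_merge_sorted_card_packs card_packs (merge_sorted_card_packs card_packs)

-- ===== LEMMAS AND PROOFS =====

-- one unfolding step of A's loop when both pops succeed
theorem mergeLoopA_step {h : List Int} {p1 p2 : Int} {h1 h2 : List Int} (hl : 1 < h.length)
    (h1e : heappopMin h = some (p1, h1)) (h2e : heappopMin h1 = some (p2, h2)) (acc : Int) :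
    mergeLoopA h acc = mergeLoopA (h2 ++ [p1 + p2]) (acc + (p1 + p2)) := by
  rw [mergeLoopA, dif_pos hl]
  split
  · simp_all
  · rename_i p1' h1' heq
    rw [h1e] at heq
    simp only [Option.some.injEq, Prod.mk.injEq] at heq
    obtain ⟨rfl, rfl⟩ := heq
    split
    · simp_all
    · rename_i p2' h2' heq2
      rw [h2e] at heq2
      simp only [Option.some.injEq, Prod.mk.injEq] at heq2
      obtain ⟨rfl, rfl⟩ := heq2
      rfl

-- popping from a list that is a permutation of a sorted list returns its head
theorem heappop_of_perm_sorted {h : List Int} {x : Int} {t : List Int}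
    (hperm : h.Perm (x :: t)) (hsort : (x :: t).Pairwise (· ≤ ·)) :
    heappopMin h = some (x, h.erase x) ∧ (h.erase x).Perm t := by
  have hx : x ∈ h := hperm.mem_iff.mpr (List.mem_cons_self ..)
  obtain ⟨m, hm⟩ : ∃ m, PySem.List.min? h (fun z => z) = some m := by
    cases hmin : PySem.List.min? h (fun z => z) with
    | none =>
      have : h = [] := (PySem.List.min?_eq_none_iff ..).mp hmin
      subst this
      exact absurd hx (by simp)
    | some m => exact ⟨m, rfl⟩
  have hmem : m ∈ h := PySem.List.min?_mem hm
  have hmin_le : ∀ y ∈ h, m ≤ y := fun y hy => PySem.List.min?_isMin hm y hy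
  have hmx : m = x := by
    refine le_antisymm (hmin_le x hx) ?_
    rcases List.mem_cons.mp (hperm.mem_iff.mp hmem) with rfl | hmt
    · exact le_refl _
    · exact (List.pairwise_cons.mp hsort).1 m hmt
  subst hmx
  refine ⟨?_, ?_⟩
  · simp [heappopMin, hm, PySem.List.remove?_eq_some_erase _ _ hmem]
  · have := hperm.erase m
    rwa [List.erase_cons_head] at this

-- a member that is a lower bound of a permutation of a sorted list is its head
theorem min_eq_head {u : List Int} {z : Int} {t : List Int} (hp : u.Perm (z :: t))
    (hs : (z :: t).Pairwise (· ≤ ·)) {v : Int} (hv : v ∈ u) (hmin : ∀ e ∈ u, v ≤ e) :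
    v = z := by
  refine le_antisymm (hmin z (hp.mem_iff.mpr (List.mem_cons_self ..))) ?_
  rcases List.mem_cons.mp (hp.mem_iff.mp hv) with rfl | hvt
  · exact le_refl _
  · exact (List.pairwise_cons.mp hs).1 v hvt

-- popping the smaller front of two sorted queues pops the overall minimum
theorem popSmaller_pop {lv mg : List Int} {z : Int} {t : List Int}
    (hlv : lv.Pairwise (· ≤ ·)) (hmg : mg.Pairwise (· ≤ ·))
    (hperm : (lv ++ mg).Perm (z :: t)) (hsort : (z :: t).Pairwise (· ≤ ·)) :
    ∃ lv' mg', popSmaller lv mg = (z, lv', mg') ∧ (lv' ++ mg').Perm t ∧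
      lv'.Pairwise (· ≤ ·) ∧ mg'.Pairwise (· ≤ ·) ∧
      ((lv = z :: lv' ∧ mg' = mg) ∨ (mg = z :: mg' ∧ lv' = lv)) := by
  rcases lv with _ | ⟨x, lt⟩ <;> rcases mg with _ | ⟨m, mt⟩
  · exact absurd hperm.length_eq (by simp)
  · -- only the merged queue is nonempty
    have hz : m = z := min_eq_head hperm hsort (by simp)
      (by
        intro e he
        simp only [List.nil_append, List.mem_cons] at he
        rcases he with rfl | he
        · exact le_refl _
        · exact (List.pairwise_cons.mp hmg).1 e he)
    subst hz
    refine ⟨[], mt, rfl, ?_, by simp, (List.pairwise_cons.mp hmg).2, Or.inr ⟨rfl, rfl⟩⟩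
    simpa using (List.Perm.cons_inv (a := m) (by simpa using hperm))
  · -- only the leaf queue is nonempty
    have hz : x = z := min_eq_head hperm hsort (by simp)
      (by
        intro e he
        simp only [List.append_nil, List.mem_cons] at he
        rcases he with rfl | he
        · exact le_refl _
        · exact (List.pairwise_cons.mp hlv).1 e he)
    subst hz
    refine ⟨lt, [], rfl, ?_, (List.pairwise_cons.mp hlv).2, by simp, Or.inl ⟨rfl, rfl⟩⟩
    simpa using (List.Perm.cons_inv (a := x) (by simpa using hperm))
  · -- both nonempty: compare the fronts
    by_cases hxm : x ≤ m
    · have hz : x = z := min_eq_head hperm hsort (by simp)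
        (by
          intro e he
          simp only [List.cons_append, List.mem_cons, List.mem_append] at he
          rcases he with rfl | he | rfl | he
          · exact le_refl _
          · exact (List.pairwise_cons.mp hlv).1 e he
          · exact hxm
          · exact le_trans hxm ((List.pairwise_cons.mp hmg).1 e he))
      subst hz
      refine ⟨lt, m :: mt, by simp [popSmaller, hxm], ?_,
        (List.pairwise_cons.mp hlv).2, hmg, Or.inl ⟨rfl, rfl⟩⟩
      exact List.Perm.cons_inv (a := x) (by simpa using hperm)
    · have hmx : m ≤ x := le_of_not_ge hxm
      have hz : m = z := min_eq_head hperm hsort (by simp)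
        (by
          intro e he
          simp only [List.cons_append, List.mem_cons, List.mem_append] at he
          rcases he with rfl | he | rfl | he
          · exact le_trans hmx (le_refl _)
          · exact le_trans hmx ((List.pairwise_cons.mp hlv).1 e he)
          · exact le_refl _
          · exact (List.pairwise_cons.mp hmg).1 e he)
      subst hz
      refine ⟨x :: lt, mt, by simp [popSmaller, hxm], ?_, hlv,
        (List.pairwise_cons.mp hmg).2, Or.inr ⟨rfl, rfl⟩⟩
      have h1 : ((x :: lt) ++ m :: mt).Perm (m :: ((x :: lt) ++ mt)) := List.perm_middle
      exact List.Perm.cons_inv (h1.symm.trans hperm)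

-- in a sorted list every member is at most the last element
theorem le_getLast_of_sorted : ∀ (l : List Int), l.Pairwise (· ≤ ·) →
    ∀ e ∈ l, ∀ L : Int, l.getLast? = some L → e ≤ L := by
  intro l
  induction l with
  | nil => intro _ e he; cases he
  | cons a l ih =>
    intro hs e he L hL
    rcases l with _ | ⟨b, l'⟩
    · simp at hL he; omega
    · rw [List.getLast?_cons_cons] at hL
      rcases List.mem_cons.mp he with rfl | he
      · have hbL : b ≤ L := ih (List.pairwise_cons.mp hs).2 b (List.mem_cons_self ..) L hL
        exact le_trans ((List.pairwise_cons.mp hs).1 b (List.mem_cons_self ..)) hbL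
      · exact ih (List.pairwise_cons.mp hs).2 e he L hL

-- ghost invariant of the merged queue: the last sum (if any) is at most 2*b for a
-- bound b that is below everything still ahead of it in either queue
def Gb (lv mg : List Int) : Prop :=
  mg = [] ∨ ∃ b : Int, (∀ e ∈ lv, b ≤ e) ∧ (∀ e ∈ mg.dropLast, b ≤ e) ∧
    (∀ L : Int, mg.getLast? = some L → L ≤ 2 * b)

-- main loop invariant: A's heap and B's two queues hold the same multiset, B's
-- queues are both sorted, and Gb guarantees the merged queue stays sorted
theorem mergeLoop_eq : ∀ (n : Nat) (s h lv mg : List Int) (acc : Int), s.length = n →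
    h.Perm s → s.Pairwise (· ≤ ·) → (lv ++ mg).Perm s →
    lv.Pairwise (· ≤ ·) → mg.Pairwise (· ≤ ·) → Gb lv mg →
    mergeLoopA h acc = twoQueueLoop lv mg acc := by
  intro n
  induction n using Nat.strong_induction_on with
  | _ n ih =>
    intro s h lv mg acc hlen hperm hsort hq hlv hmg hgb
    unfold Gb at hgb
    have hlq : lv.length + mg.length = s.length := by
      have := hq.length_eq; simpa using this
    rcases s with _ | ⟨x, _ | ⟨y, rest⟩⟩
    · have hh : h = [] := List.Perm.eq_nil hperm
      subst hh
      have h0 : lv.length + mg.length = 0 := by simpa using hlq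
      rw [mergeLoopA, twoQueueLoop, dif_neg (by simp), dif_neg (by omega)]
    · have h1 : lv.length + mg.length = 1 := by simpa using hlq
      rw [mergeLoopA, twoQueueLoop,
        dif_neg (by rw [hperm.length_eq]; simp), dif_neg (by omega)]
    · have hh2 : 1 < h.length := by rw [hperm.length_eq]; simp
      have hq2 : 1 < lv.length + mg.length := by rw [hlq]; simp
      -- A side: two heap pops return the two smallest
      obtain ⟨hpop1, hperm1⟩ := heappop_of_perm_sorted hperm hsort
      have hsort1 : (y :: rest).Pairwise (· ≤ ·) := (List.pairwise_cons.mp hsort).2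
      obtain ⟨hpop2, hperm2⟩ := heappop_of_perm_sorted hperm1 hsort1
      have hxy : x ≤ y := (List.pairwise_cons.mp hsort).1 y (List.mem_cons_self ..)
      have hyrest : ∀ e ∈ rest, y ≤ e := (List.pairwise_cons.mp hsort1).1
      rw [mergeLoopA_step hh2 hpop1 hpop2]
      -- B side: two front pops return the same two smallest
      obtain ⟨lv1, mg1, hP1, hq1, hlv1, hmg1, hd1⟩ := popSmaller_pop hlv hmg hq hsort
      obtain ⟨lv2, mg2, hP2, hq2', hlv2, hmg2, hd2⟩ := popSmaller_pop hlv1 hmg1 hq1 hsort1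
      rw [twoQueueLoop, dif_pos hq2]
      simp only [hP1, hP2]
      -- every element still in the merged queue is at most the new sum x + y
      have hmg2_le : ∀ e ∈ mg2, e ≤ x + y := by
        intro e he
        rcases hd1 with ⟨hA1, hA2⟩ | ⟨hA1, hA2⟩ <;> rcases hd2 with ⟨hB1, hB2⟩ | ⟨hB1, hB2⟩
        · -- both pops from the leaf queue
          have hemg : e ∈ mg := by rw [← hA2, ← hB2]; exact he
          have hmgne : mg ≠ [] := List.ne_nil_of_mem hemg
          rcases hgb with h0 | ⟨b, hb1, hb2, hb3⟩
          · exact absurd h0 hmgne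
          obtain ⟨L, hL⟩ := Option.isSome_iff_exists.mp (List.getLast?_isSome.mpr hmgne)
          have heL := le_getLast_of_sorted _ hmg _ hemg _ hL
          have hL2 := hb3 L hL
          have hbx : b ≤ x := hb1 x (by rw [hA1]; simp)
          have hby : b ≤ y := hb1 y (by rw [hA1, hB1]; simp)
          omega
        · -- first pop from leaves, second from merged: mg = y :: mg2
          rcases mg2 with _ | ⟨c, ml⟩
          · cases he
          have hmg_eq : mg = y :: c :: ml := by rw [← hA2, hB1]
          have hemg : e ∈ mg := by rw [hmg_eq]; exact List.mem_cons_of_mem _ he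
          have hmgne : mg ≠ [] := List.ne_nil_of_mem hemg
          rcases hgb with h0 | ⟨b, hb1, hb2, hb3⟩
          · exact absurd h0 hmgne
          obtain ⟨L, hL⟩ := Option.isSome_iff_exists.mp (List.getLast?_isSome.mpr hmgne)
          have heL := le_getLast_of_sorted _ hmg _ hemg _ hL
          have hL2 := hb3 L hL
          have hbx : b ≤ x := hb1 x (by rw [hA1]; simp)
          have hby : b ≤ y := hb2 y (by rw [hmg_eq]; simp [List.dropLast])
          omega
        · -- first pop from merged, second from leaves: mg = x :: mg2
          rcases mg2 with _ | ⟨c, ml⟩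
          · cases he
          have hmg_eq : mg = x :: c :: ml := by rw [hA1, ← hB2]
          have hemg : e ∈ mg := by rw [hmg_eq]; exact List.mem_cons_of_mem _ he
          have hmgne : mg ≠ [] := List.ne_nil_of_mem hemg
          rcases hgb with h0 | ⟨b, hb1, hb2, hb3⟩
          · exact absurd h0 hmgne
          obtain ⟨L, hL⟩ := Option.isSome_iff_exists.mp (List.getLast?_isSome.mpr hmgne)
          have heL := le_getLast_of_sorted _ hmg _ hemg _ hL
          have hL2 := hb3 L hL
          have hbx : b ≤ x := hb2 x (by rw [hmg_eq]; simp [List.dropLast])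
          have hby : b ≤ y := hb1 y (by rw [← hA2, hB1]; simp)
          omega
        · -- both pops from the merged queue: mg = x :: y :: mg2
          rcases mg2 with _ | ⟨c, ml⟩
          · cases he
          have hmg_eq : mg = x :: y :: c :: ml := by rw [hA1, hB1]
          have hemg : e ∈ mg := by
            rw [hmg_eq]
            exact List.mem_cons_of_mem _ (List.mem_cons_of_mem _ he)
          have hmgne : mg ≠ [] := List.ne_nil_of_mem hemg
          rcases hgb with h0 | ⟨b, hb1, hb2, hb3⟩
          · exact absurd h0 hmgne
          obtain ⟨L, hL⟩ := Option.isSome_iff_exists.mp (List.getLast?_isSome.mpr hmgne)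
          have heL := le_getLast_of_sorted _ hmg _ hemg _ hL
          have hL2 := hb3 L hL
          have hbx : b ≤ x := hb2 x (by rw [hmg_eq]; simp [List.dropLast])
          have hby : b ≤ y := hb2 y (by rw [hmg_eq]; simp [List.dropLast])
          omega
      -- the merged queue stays sorted after appending the new sum
      have hmg2' : (mg2 ++ [x + y]).Pairwise (· ≤ ·) := by
        rw [List.pairwise_append]
        refine ⟨hmg2, by simp, ?_⟩
        intro a ha b hb
        rw [List.mem_singleton] at hb
        subst hb
        exact hmg2_le a ha
      -- the recursion target: any sorted arrangement of the new multiset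
      have hrest : rest.Pairwise (· ≤ ·) := (List.pairwise_cons.mp hsort1).2
      set s' := List.orderedInsert (· ≤ ·) (x + y) rest with hs'
      have hs'perm : s'.Perm ((x + y) :: rest) := List.perm_orderedInsert _ _ _
      have hs'sort : s'.Pairwise (· ≤ ·) := List.Pairwise.orderedInsert _ _ hrest
      have hs'len : s'.length = rest.length + 1 := by rw [hs'perm.length_eq]; rfl
      have hn' : s'.length < n := by rw [hs'len, ← hlen]; simp
      have hhperm' : (((h.erase x).erase y) ++ [x + y]).Perm s' := by
        have h1 : (((h.erase x).erase y) ++ [x + y]).Perm ((x + y) :: ((h.erase x).erase y)) :=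
          List.perm_append_singleton _ _
        exact (h1.trans (List.Perm.cons _ hperm2)).trans hs'perm.symm
      have hqperm' : (lv2 ++ (mg2 ++ [x + y])).Perm s' := by
        have h1 : (lv2 ++ (mg2 ++ [x + y])).Perm ((lv2 ++ mg2) ++ [x + y]) := by
          rw [List.append_assoc]
        have h2 : ((lv2 ++ mg2) ++ [x + y]).Perm ((x + y) :: (lv2 ++ mg2)) :=
          List.perm_append_singleton _ _
        exact ((h1.trans h2).trans (List.Perm.cons _ hq2')).trans hs'perm.symm
      -- re-establish the ghost invariant with bound y
      have hgb' : Gb lv2 (mg2 ++ [x + y]) := by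
        refine Or.inr ⟨y, ?_, ?_, ?_⟩
        · intro e he
          exact hyrest e (hq2'.mem_iff.mp (List.mem_append_left _ he))
        · intro e he
          rw [List.dropLast_concat] at he
          exact hyrest e (hq2'.mem_iff.mp (List.mem_append_right _ he))
        · intro L hL
          rw [List.getLast?_concat] at hL
          have hLxy : x + y = L := by simpa using hL
          omega
      exact ih s'.length hn' s' _ _ _ _ rfl hhperm' hs'sort hqperm' hlv2 hmg2' hgb'

-- ===== VERDICT (by name: the statement is the Claim_ definition above) =====
theorem merge_sorted_card_packs_spec : Claim_equal_merge_sorted_card_packs := by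
  intro card_packs _
  unfold Spec_merge_sorted_card_packs merge_sorted_card_packs merge_sorted_card_packs_alt
  exact mergeLoop_eq _ _ _ _ [] 0 rfl
    (PySem.List.sorted_perm ..).symm
    (by simpa using PySem.List.sorted_pairwise (xs := card_packs) (key := fun z => z))
    (by simpa using (PySem.List.sorted_perm (xs := card_packs) (key := fun z => z) (rev := false)))
    (by simpa using PySem.List.sorted_pairwise (xs := card_packs) (key := fun z => z))
    (by simp)
    (Or.inl rfl)
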